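-- pv_equiv track=rewrite | github.com/justjacobrosario/BS_Computer_Science_UPD_Repo | 1st Year 1st Sem/python test drive/lab5/a.py | movie_highlights
-- ===== SOURCE A (Python) =====
-- def movie_highlights(arr):
--     n = len(arr)
--
--     prev_greater = [-1] * n
--     next_greater = [n] * n
--     stack = []
--
--     # previous greater (strictly greater to the left)
--     for i in range(n):
--         while stack != [] and arr[stack[-1]] < arr[i]:
--             stack.pop()
--         else:
--             if stack != []:
--                 prev_greater[i] = stack[-1]
--         stack.append(i)
--
--     stack = []
--     # next greater or equal (first index to the right which is > or ==)
--     for i in range(n)[::-1]: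
--         while stack and arr[stack[-1]] <= arr[i]:
--             stack.pop()
--         else:
--             if stack != []:
--                 next_greater[i] = stack[-1]
--         stack.append(i)
--
--     result = {}
--     for i in range(n):
--         L = i - prev_greater[i]   # choices for start index
--         R = next_greater[i] - i   # choices for end index
--         if arr[i] in result:
--             result[arr[i]] += (L * R)
--         else:
--             result[arr[i]] = L * R
--
--     return result
-- ===== SOURCE B (Python) =====
-- def movie_highlights(arr):
--     n = len(arr)
--     result = {}
--     for i in range(n):
--         x = arr[i]
--         l = i
--         while l > 0 and arr[l - 1] < x:
--             l -= 1
--         r = i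
--         while r + 1 < n and arr[r + 1] <= x:
--             r += 1
--         result[x] = result.get(x, 0) + (i - l + 1) * (r - i + 1)
--     return result
-- ===== Notes on version B (the rewrite author's own statement) =====
-- stated objective: simpler
-- what changed: Replaced the two monotonic-stack passes and the precomputed prev/next index arrays by a single loop that, for each index, finds its span directly with two small inward/outward scans and accumulates the count into the dict immediately.
import Mathlib
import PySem

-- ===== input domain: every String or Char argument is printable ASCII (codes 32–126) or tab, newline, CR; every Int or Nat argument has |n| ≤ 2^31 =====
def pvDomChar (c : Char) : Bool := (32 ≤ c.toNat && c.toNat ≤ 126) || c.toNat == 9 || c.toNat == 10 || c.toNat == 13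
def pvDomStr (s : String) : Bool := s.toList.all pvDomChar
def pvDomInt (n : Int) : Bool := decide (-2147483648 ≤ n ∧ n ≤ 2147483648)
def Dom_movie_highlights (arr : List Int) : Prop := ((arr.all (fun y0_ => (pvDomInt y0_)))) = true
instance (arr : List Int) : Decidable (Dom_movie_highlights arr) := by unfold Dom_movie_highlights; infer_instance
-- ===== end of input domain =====

-- B replaces A's two monotonic-stack passes (and the prev/next index arrays) by a single loop
-- with two direct scans per index; B is simpler, not faster (O(n^2) vs A's O(n)).

-- ===== PORT A =====
-- inner 'while stack != [] and arr[stack[-1]] < arr[i]: stack.pop()' (stack head = Python's stack[-1])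
def popL (arr : List Int) (x : Int) : List Nat → List Nat
  | [] => []
  | t :: s => if arr.getD t 0 < x then popL arr x s else t :: s

-- one iteration of the first 'for i in range(n)' loop, state = (prev_greater, stack)
def stepL (arr : List Int) (st : List Int × List Nat) (i : Nat) : List Int × List Nat :=
  let s := popL arr (arr.getD i 0) st.2
  let prev := match s with
    | [] => st.1
    | t :: _ => st.1.set i (t : Int)
  (prev, i :: s)

-- inner 'while stack and arr[stack[-1]] <= arr[i]: stack.pop()'
def popR (arr : List Int) (x : Int) : List Nat → List Nat
  | [] => []
  | t :: s => if arr.getD t 0 ≤ x then popR arr x s else t :: s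

-- one iteration of the 'for i in range(n)[::-1]' loop, state = (next_greater, stack)
def stepR (arr : List Int) (st : List Int × List Nat) (i : Nat) : List Int × List Nat :=
  let s := popR arr (arr.getD i 0) st.2
  let nxt := match s with
    | [] => st.1
    | t :: _ => st.1.set i (t : Int)
  (nxt, i :: s)

def movie_highlights (arr : List Int) : List (Int × Int) :=
  let n := arr.length
  let pg := ((List.range n).foldl (stepL arr) (List.replicate n (-1), [])).1
  let ng := ((List.range n).reverse.foldl (stepR arr) (List.replicate n (n : Int), [])).1
  ((List.range n).foldl (fun d (i : Nat) =>
      let L : Int := (i : Int) - pg.getD i 0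
      let R : Int := ng.getD i 0 - (i : Int)
      let a := arr.getD i 0
      match d.get? a with
      | some v => d.insert a (v + L * R)
      | none => d.insert a (L * R))
    (PySem.Dict.empty : PySem.Dict Int Int)).items

-- ===== PORT B =====
-- 'while l > 0 and arr[l-1] < x: l -= 1' (recursion on l)
def scanL (arr : List Int) (x : Int) : Nat → Nat
  | 0 => 0
  | l + 1 => if arr.getD l 0 < x then scanL arr x l else l + 1

-- 'while r + 1 < n and arr[r+1] <= x: r += 1' (fuel n makes the loop structural; never exhausted)
def scanR (arr : List Int) (x : Int) (n : Nat) : Nat → Nat → Nat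
  | 0, r => r
  | f + 1, r => if r + 1 < n ∧ arr.getD (r + 1) 0 ≤ x then scanR arr x n f (r + 1) else r

def movie_highlights_alt (arr : List Int) : List (Int × Int) :=
  let n := arr.length
  ((List.range n).foldl (fun d (i : Nat) =>
      let x := arr.getD i 0
      let l := scanL arr x i
      let r := scanR arr x n n i
      d.insert x (d.getD x 0 + ((i : Int) - l + 1) * ((r : Int) - i + 1)))
    (PySem.Dict.empty : PySem.Dict Int Int)).items

-- ===== PRECONDITION & SPEC =====
def Spec_movie_highlights (arr : List Int) (out : List (Int × Int)) : Prop := out = movie_highlights_alt arr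
instance (arr : List Int) (out : List (Int × Int)) : Decidable (Spec_movie_highlights arr out) := by unfold Spec_movie_highlights; infer_instance

-- ===== CLAIM (what is proved, stated in full; the proofs are below) =====
def Claim_equal_movie_highlights : Prop := ∀ (arr : List Int), Dom_movie_highlights arr → Spec_movie_highlights arr (movie_highlights arr)

-- ===== LEMMAS AND PROOFS =====

-- the stack after the first loop has processed indices 0..i-1
def sFL (arr : List Int) : Nat → List Nat
  | 0 => []
  | i + 1 => i :: popL arr (arr.getD i 0) (sFL arr i)

-- the prev_greater array after the first loop has processed indices 0..i-1
def pFL (arr : List Int) (n : Nat) : Nat → List Int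
  | 0 => List.replicate n (-1)
  | i + 1 =>
    match popL arr (arr.getD i 0) (sFL arr i) with
    | [] => pFL arr n i
    | t :: _ => (pFL arr n i).set i (t : Int)

-- the stack after the second loop has processed the top m indices n-1, …, n-m
def sFR (arr : List Int) (n : Nat) : Nat → List Nat
  | 0 => []
  | m + 1 => (n - m - 1) :: popR arr (arr.getD (n - m - 1) 0) (sFR arr n m)

-- the next_greater array after the second loop has processed the top m indices
def pFR (arr : List Int) (n : Nat) : Nat → List Int
  | 0 => List.replicate n (n : Int)
  | m + 1 =>
    match popR arr (arr.getD (n - m - 1) 0) (sFR arr n m) with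
    | [] => pFR arr n m
    | t :: _ => (pFR arr n m).set (n - m - 1) (t : Int)

-- the second loop as a downward recursion
def goR (arr : List Int) : Nat → (List Int × List Nat) → (List Int × List Nat)
  | 0, st => st
  | m + 1, st => goR arr m (stepR arr st m)

def pvalL (arr : List Int) (i : Nat) : Int :=
  match popL arr (arr.getD i 0) (sFL arr i) with
  | [] => -1
  | t :: _ => (t : Int)

def pvalR (arr : List Int) (n i : Nat) : Int :=
  match popR arr (arr.getD i 0) (sFR arr n (n - i - 1)) with
  | [] => (n : Int)
  | t :: _ => (t : Int)

lemma popL_subset (arr : List Int) (x : Int) : ∀ l (j : Nat), j ∈ popL arr x l → j ∈ l := by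
  intro l
  induction l with
  | nil => simp [popL]
  | cons t s ih =>
    intro j
    simp only [popL]
    split_ifs with h
    · intro hj; exact List.mem_cons_of_mem _ (ih j hj)
    · exact fun hj => hj

lemma popL_pairwise {P : Nat → Nat → Prop} (arr : List Int) (x : Int) :
    ∀ l : List Nat, l.Pairwise P → (popL arr x l).Pairwise P := by
  intro l
  induction l with
  | nil => simp [popL]
  | cons t s ih =>
    intro h
    simp only [popL]
    split_ifs with hc
    · exact ih (List.pairwise_cons.mp h).2
    · exact h

lemma mem_popL (arr : List Int) (x : Int) :
    ∀ l : List Nat, l.Pairwise (fun a b => arr.getD a 0 ≤ arr.getD b 0) →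
      ∀ j, j ∈ popL arr x l ↔ (j ∈ l ∧ x ≤ arr.getD j 0) := by
  intro l
  induction l with
  | nil => simp [popL]
  | cons t s ih =>
    intro h j
    obtain ⟨ht, hs⟩ := List.pairwise_cons.mp h
    simp only [popL]
    split_ifs with hc
    · rw [ih hs j]
      constructor
      · rintro ⟨hj, hx⟩; exact ⟨List.mem_cons_of_mem _ hj, hx⟩
      · rintro ⟨hj, hx⟩
        rcases List.mem_cons.mp hj with rfl | hj
        · omega
        · exact ⟨hj, hx⟩
    · constructor
      · intro hj
        refine ⟨hj, ?_⟩
        rcases List.mem_cons.mp hj with rfl | hj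
        · omega
        · have := ht j hj; omega
      · exact fun hj => hj.1

lemma popR_subset (arr : List Int) (x : Int) : ∀ l (j : Nat), j ∈ popR arr x l → j ∈ l := by
  intro l
  induction l with
  | nil => simp [popR]
  | cons t s ih =>
    intro j
    simp only [popR]
    split_ifs with h
    · intro hj; exact List.mem_cons_of_mem _ (ih j hj)
    · exact fun hj => hj

lemma popR_pairwise {P : Nat → Nat → Prop} (arr : List Int) (x : Int) :
    ∀ l : List Nat, l.Pairwise P → (popR arr x l).Pairwise P := by
  intro l
  induction l with
  | nil => simp [popR]
  | cons t s ih =>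
    intro h
    simp only [popR]
    split_ifs with hc
    · exact ih (List.pairwise_cons.mp h).2
    · exact h

lemma mem_popR (arr : List Int) (x : Int) :
    ∀ l : List Nat, l.Pairwise (fun a b => arr.getD a 0 ≤ arr.getD b 0) →
      ∀ j, j ∈ popR arr x l ↔ (j ∈ l ∧ x < arr.getD j 0) := by
  intro l
  induction l with
  | nil => simp [popR]
  | cons t s ih =>
    intro h j
    obtain ⟨ht, hs⟩ := List.pairwise_cons.mp h
    simp only [popR]
    split_ifs with hc
    · rw [ih hs j]
      constructor
      · rintro ⟨hj, hx⟩; exact ⟨List.mem_cons_of_mem _ hj, hx⟩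
      · rintro ⟨hj, hx⟩
        rcases List.mem_cons.mp hj with rfl | hj
        · omega
        · exact ⟨hj, hx⟩
    · constructor
      · intro hj
        refine ⟨hj, ?_⟩
        rcases List.mem_cons.mp hj with rfl | hj
        · omega
        · have := ht j hj; omega
      · exact fun hj => hj.1

-- invariant of the first loop's stack
lemma invL (arr : List Int) : ∀ i : Nat,
    (∀ j, j ∈ sFL arr i ↔ (j < i ∧ ∀ k, j < k → k < i → arr.getD k 0 ≤ arr.getD j 0)) ∧
    (sFL arr i).Pairwise (fun a b => b < a ∧ arr.getD a 0 ≤ arr.getD b 0) := by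
  intro i
  induction i with
  | zero => simp [sFL]
  | succ i ih =>
    obtain ⟨hmem, hpw⟩ := ih
    have hpwv : (sFL arr i).Pairwise (fun a b => arr.getD a 0 ≤ arr.getD b 0) :=
      hpw.imp (fun h => h.2)
    constructor
    · intro j
      simp only [sFL, List.mem_cons]
      rw [mem_popL arr _ _ hpwv j]
      constructor
      · rintro (rfl | ⟨hj, hx⟩)
        · exact ⟨Nat.lt_succ_self _, by omega⟩
        · obtain ⟨hji, hall⟩ := (hmem j).mp hj
          refine ⟨by omega, ?_⟩
          intro k hk1 hk2
          by_cases hki : k = i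
          · subst hki; exact hx
          · exact hall k hk1 (by omega)
      · rintro ⟨hji, hall⟩
        by_cases hj : j = i
        · exact Or.inl hj
        · refine Or.inr ⟨(hmem j).mpr ⟨by omega, fun k hk1 hk2 => hall k hk1 (by omega)⟩, ?_⟩
          exact hall i (by omega) (Nat.lt_succ_self _)
    · simp only [sFL]
      rw [List.pairwise_cons]
      refine ⟨?_, popL_pairwise arr _ _ hpw⟩
      intro b hb
      have hb' := (mem_popL arr _ _ hpwv b).mp hb
      have hbs := popL_subset arr _ _ b hb
      have := (hmem b).mp hbs
      exact ⟨this.1, hb'.2⟩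

-- invariant of the second loop's stack
lemma invR (arr : List Int) (n : Nat) : ∀ m : Nat, m ≤ n →
    (∀ j, j ∈ sFR arr n m ↔ (n - m ≤ j ∧ j < n ∧ ∀ k, n - m ≤ k → k < j → arr.getD k 0 < arr.getD j 0)) ∧
    (sFR arr n m).Pairwise (fun a b => a < b ∧ arr.getD a 0 < arr.getD b 0) := by
  intro m
  induction m with
  | zero => simp [sFR]; omega
  | succ m ih =>
    intro hmn
    obtain ⟨hmem, hpw⟩ := ih (by omega)
    have hpwv : (sFR arr n m).Pairwise (fun a b => arr.getD a 0 ≤ arr.getD b 0) :=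
      hpw.imp (fun h => le_of_lt h.2)
    constructor
    · intro j
      simp only [sFR, List.mem_cons]
      rw [mem_popR arr _ _ hpwv j]
      constructor
      · rintro (rfl | ⟨hj, hx⟩)
        · exact ⟨by omega, by omega, by omega⟩
        · obtain ⟨hj1, hj2, hall⟩ := (hmem j).mp hj
          refine ⟨by omega, hj2, ?_⟩
          intro k hk1 hk2
          by_cases hki : k = n - m - 1
          · subst hki; exact hx
          · exact hall k (by omega) hk2
      · rintro ⟨hj1, hj2, hall⟩
        by_cases hj : j = n - m - 1
        · exact Or.inl hj
        · refine Or.inr ⟨(hmem j).mpr ⟨by omega, hj2, fun k hk1 hk2 => hall k (by omega) hk2⟩, ?_⟩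
          exact hall (n - m - 1) (by omega) (by omega)
    · simp only [sFR]
      rw [List.pairwise_cons]
      refine ⟨?_, popR_pairwise arr _ _ hpw⟩
      intro b hb
      have hb' := (mem_popR arr _ _ hpwv b).mp hb
      have hbs := popR_subset arr _ _ b hb
      have := (hmem b).mp hbs
      exact ⟨by omega, hb'.2⟩

-- the first foldl equals the (pFL, sFL) recursion
lemma foldL_eq (arr : List Int) (n : Nat) : ∀ m : Nat,
    (List.range m).foldl (stepL arr) (List.replicate n (-1), []) = (pFL arr n m, sFL arr m) := by
  intro m
  induction m with
  | zero => simp [pFL, sFL]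
  | succ m ih =>
    rw [List.range_succ, List.foldl_append, ih]
    simp only [List.foldl_cons, List.foldl_nil, stepL]
    cases h : popL arr (arr.getD m 0) (sFL arr m) with
    | nil => simp only [pFL, sFL, h]
    | cons t s => simp only [pFL, sFL, h]

lemma revfold (arr : List Int) : ∀ (m : Nat) (st : List Int × List Nat),
    (List.range m).reverse.foldl (stepR arr) st = goR arr m st := by
  intro m
  induction m with
  | zero => intro st; simp [goR]
  | succ m ih =>
    intro st
    rw [List.range_succ, List.reverse_append]
    simp only [List.reverse_cons, List.reverse_nil, List.nil_append, List.singleton_append,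
      List.foldl_cons]
    rw [ih]
    rfl

lemma goR_partial (arr : List Int) (n : Nat) : ∀ j : Nat, j ≤ n →
    goR arr n (List.replicate n (n : Int), []) = goR arr (n - j) (pFR arr n j, sFR arr n j) := by
  intro j
  induction j with
  | zero => intro _; simp [pFR, sFR]
  | succ j ih =>
    intro hj
    rw [ih (by omega)]
    have hnj : n - j = (n - (j + 1)) + 1 := by omega
    rw [hnj]
    simp only [goR]
    have hst : stepR arr (pFR arr n j, sFR arr n j) (n - (j + 1)) =
        (pFR arr n (j + 1), sFR arr n (j + 1)) := by
      have hidx : n - (j + 1) = n - j - 1 := by omega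
      simp only [stepR, hidx]
      cases h : popR arr (arr.getD (n - j - 1) 0) (sFR arr n j) with
      | nil => simp only [pFR, sFR, h]
      | cons t s => simp only [pFR, sFR, h]
    rw [hst]

lemma foldR_eq (arr : List Int) (n : Nat) :
    (List.range n).reverse.foldl (stepR arr) (List.replicate n (n : Int), []) =
      (pFR arr n n, sFR arr n n) := by
  rw [revfold, goR_partial arr n n le_rfl]
  simp [goR]

lemma getD_set_eq (l : List Int) (i : Nat) (v : Int) (h : i < l.length) :
    (l.set i v).getD i 0 = v := by
  simp [List.getD_eq_getElem?_getD, h]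

lemma getD_set_ne (l : List Int) (i j : Nat) (v : Int) (h : j ≠ i) :
    (l.set i v).getD j 0 = l.getD j 0 := by
  simp [List.getD_eq_getElem?_getD, Ne.symm h]

lemma pFL_length (arr : List Int) (n : Nat) : ∀ m, (pFL arr n m).length = n := by
  intro m
  induction m with
  | zero => simp [pFL]
  | succ m ih =>
    simp only [pFL]
    cases popL arr (arr.getD m 0) (sFL arr m) with
    | nil => exact ih
    | cons t s => simp [ih]

lemma pFL_getD (arr : List Int) (n : Nat) : ∀ m, m ≤ n → ∀ i, i < n →
    (pFL arr n m).getD i 0 = if i < m then pvalL arr i else -1 := by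
  intro m
  induction m with
  | zero => intro _ i hi; simp [pFL, hi]
  | succ m ih =>
    intro hm i hi
    simp only [pFL]
    by_cases him : i = m
    · subst him
      simp only [if_pos (Nat.lt_succ_self i), pvalL]
      cases h : popL arr (arr.getD i 0) (sFL arr i) with
      | nil => rw [ih (by omega) i hi]; simp
      | cons t s => rw [getD_set_eq _ _ _ (by rw [pFL_length]; omega)]
    · have hv : ∀ z : Int, z = (if i < m then pvalL arr i else -1) →
          z = (if i < m + 1 then pvalL arr i else -1) := by
        intro z hz
        by_cases h2 : i < m
        · rw [hz, if_pos h2, if_pos (by omega)]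
        · rw [hz, if_neg h2, if_neg (by omega)]
      cases h : popL arr (arr.getD m 0) (sFL arr m) with
      | nil => exact hv _ (ih (by omega) i hi)
      | cons t s => rw [getD_set_ne _ _ _ _ him]; exact hv _ (ih (by omega) i hi)

lemma pFR_length (arr : List Int) (n : Nat) : ∀ m, (pFR arr n m).length = n := by
  intro m
  induction m with
  | zero => simp [pFR]
  | succ m ih =>
    simp only [pFR]
    cases popR arr (arr.getD (n - m - 1) 0) (sFR arr n m) with
    | nil => exact ih
    | cons t s => simp [ih]

lemma pFR_getD (arr : List Int) (n : Nat) : ∀ m, m ≤ n → ∀ i, i < n →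
    (pFR arr n m).getD i 0 = if n - m ≤ i then pvalR arr n i else (n : Int) := by
  intro m
  induction m with
  | zero =>
    intro _ i hi
    have : ¬ (n - 0 ≤ i) := by omega
    simp [pFR, hi, this]
  | succ m ih =>
    intro hm i hi
    simp only [pFR]
    by_cases him : i = n - m - 1
    · subst him
      have hcond : n - (m + 1) ≤ n - m - 1 := by omega
      rw [if_pos hcond]
      have hni : n - (n - m - 1) - 1 = m := by omega
      simp only [pvalR, hni]
      cases h : popR arr (arr.getD (n - m - 1) 0) (sFR arr n m) with
      | nil =>
        rw [ih (by omega) _ hi]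
        have : ¬ (n - m ≤ n - m - 1) := by omega
        simp [this]
      | cons t s =>
        rw [getD_set_eq _ _ _ (by rw [pFR_length]; omega)]
    · have hv : ∀ z : Int, z = (if n - m ≤ i then pvalR arr n i else (n : Int)) →
          z = (if n - (m + 1) ≤ i then pvalR arr n i else (n : Int)) := by
        intro z hz
        by_cases h2 : n - m ≤ i
        · rw [hz, if_pos h2, if_pos (by omega)]
        · rw [hz, if_neg h2, if_neg (by omega)]
      cases h : popR arr (arr.getD (n - m - 1) 0) (sFR arr n m) with
      | nil => exact hv _ (ih (by omega) i hi)
      | cons t s => rw [getD_set_ne _ _ _ _ him]; exact hv _ (ih (by omega) i hi)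

-- scanL characterisation
lemma scanL_le (arr : List Int) (x : Int) : ∀ i, scanL arr x i ≤ i := by
  intro i
  induction i with
  | zero => simp [scanL]
  | succ i ih =>
    simp only [scanL]
    split_ifs with h
    · omega
    · omega

lemma scanL_lt (arr : List Int) (x : Int) : ∀ i k, scanL arr x i ≤ k → k < i → arr.getD k 0 < x := by
  intro i
  induction i with
  | zero => omega
  | succ i ih =>
    intro k
    simp only [scanL]
    split_ifs with h
    · intro hk1 hk2
      by_cases hki : k = i
      · subst hki; exact h
      · exact ih k hk1 (by omega)
    · omega

lemma scanL_stop (arr : List Int) (x : Int) : ∀ i,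
    scanL arr x i = 0 ∨ ∃ m, scanL arr x i = m + 1 ∧ x ≤ arr.getD m 0 := by
  intro i
  induction i with
  | zero => left; rfl
  | succ i ih =>
    simp only [scanL]
    split_ifs with h
    · exact ih
    · exact Or.inr ⟨i, rfl, by omega⟩

-- scanR characterisation (fuel version)
lemma scanR_ge (arr : List Int) (x : Int) (n : Nat) : ∀ f r, r ≤ scanR arr x n f r := by
  intro f
  induction f with
  | zero => intro r; simp [scanR]
  | succ f ih =>
    intro r
    simp only [scanR]
    split_ifs with h
    · have := ih (r + 1); omega
    · omega

lemma scanR_lt_n (arr : List Int) (x : Int) (n : Nat) : ∀ f r, r < n → scanR arr x n f r < n := by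
  intro f
  induction f with
  | zero => intro r h; simpa [scanR]
  | succ f ih =>
    intro r h
    simp only [scanR]
    split_ifs with hc
    · exact ih (r + 1) hc.1
    · exact h

lemma scanR_le_x (arr : List Int) (x : Int) (n : Nat) : ∀ f r k, r < k →
    k ≤ scanR arr x n f r → arr.getD k 0 ≤ x := by
  intro f
  induction f with
  | zero => intro r k h1 h2; simp [scanR] at h2; omega
  | succ f ih =>
    intro r k h1
    simp only [scanR]
    split_ifs with hc
    · intro h2
      by_cases hk : k = r + 1
      · subst hk; exact hc.2
      · exact ih (r + 1) k (by omega) h2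
    · omega

lemma scanR_stop (arr : List Int) (x : Int) (n : Nat) : ∀ f r, r < n → n - 1 - r ≤ f →
    scanR arr x n f r = n - 1 ∨
      (scanR arr x n f r + 1 < n ∧ x < arr.getD (scanR arr x n f r + 1) 0) := by
  intro f
  induction f with
  | zero => intro r h1 h2; simp only [scanR]; omega
  | succ f ih =>
    intro r h1 h2
    simp only [scanR]
    split_ifs with hc
    · exact ih (r + 1) hc.1 (by omega)
    · by_cases hn : r + 1 < n
      · right
        refine ⟨hn, ?_⟩
        by_contra hx
        exact hc ⟨hn, by omega⟩
      · left; omega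

-- A's prev_greater[i] equals B's left scan result minus one
lemma pvalL_eq_scanL (arr : List Int) (i : Nat) :
    pvalL arr i = (scanL arr (arr.getD i 0) i : Int) - 1 := by
  obtain ⟨hmem, hpw⟩ := invL arr i
  have hpwv : (sFL arr i).Pairwise (fun a b => arr.getD a 0 ≤ arr.getD b 0) :=
    hpw.imp (fun h => h.2)
  rcases scanL_stop arr (arr.getD i 0) i with h0 | ⟨m, hm, hxm⟩
  · rw [h0]
    unfold pvalL
    cases h : popL arr (arr.getD i 0) (sFL arr i) with
    | nil => norm_num
    | cons t s =>
      exfalso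
      have ht : t ∈ popL arr (arr.getD i 0) (sFL arr i) := by rw [h]; exact List.mem_cons_self
      have hx := (mem_popL arr _ _ hpwv t).mp ht
      have hti := (hmem t).mp hx.1
      have := scanL_lt arr (arr.getD i 0) i t (by omega) hti.1
      omega
  · have hmi : m < i := by have := scanL_le arr (arr.getD i 0) i; omega
    have hmstack : m ∈ sFL arr i := by
      refine (hmem m).mpr ⟨hmi, ?_⟩
      intro k hk1 hk2
      have := scanL_lt arr (arr.getD i 0) i k (by omega) hk2
      omega
    have hmpop : m ∈ popL arr (arr.getD i 0) (sFL arr i) :=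
      (mem_popL arr _ _ hpwv m).mpr ⟨hmstack, hxm⟩
    unfold pvalL
    cases h : popL arr (arr.getD i 0) (sFL arr i) with
    | nil => rw [h] at hmpop; simp at hmpop
    | cons t s =>
      rw [h] at hmpop
      have ht : t ∈ popL arr (arr.getD i 0) (sFL arr i) := by rw [h]; exact List.mem_cons_self
      have htx := (mem_popL arr _ _ hpwv t).mp ht
      have hti := (hmem t).mp htx.1
      have htm : t ≤ m := by
        by_contra hc
        have := scanL_lt arr (arr.getD i 0) i t (by omega) hti.1
        omega
      have hmt : m ≤ t := by
        rcases List.mem_cons.mp hmpop with rfl | hms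
        · omega
        · have hpw' := popL_pairwise arr (arr.getD i 0) _ hpw
          rw [h] at hpw'
          have := (List.pairwise_cons.mp hpw').1 m hms
          omega
      have htm2 : t = m := by omega
      rw [htm2, hm]
      show ((m : Nat) : Int) = ((m + 1 : Nat) : Int) - 1
      push_cast
      ring

-- A's next_greater[i] equals B's right scan result plus one
lemma pvalR_eq_scanR (arr : List Int) (n : Nat) (i : Nat) (hi : i < n) (hn : n = arr.length) :
    pvalR arr n i = (scanR arr (arr.getD i 0) n n i : Int) + 1 := by
  obtain ⟨hmem, hpw⟩ := invR arr n (n - i - 1) (by omega)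
  have hpwv : (sFR arr n (n - i - 1)).Pairwise (fun a b => arr.getD a 0 ≤ arr.getD b 0) :=
    hpw.imp (fun h => le_of_lt h.2)
  have hlow : n - (n - i - 1) = i + 1 := by omega
  set x := arr.getD i 0 with hx
  have hr0 := scanR_ge arr x n n i
  have hrn := scanR_lt_n arr x n n i hi
  rcases scanR_stop arr x n n i hi (by omega) with hstop | ⟨hlt, hgt⟩
  · -- everything to the right is ≤ x: the stack pops empty, next_greater stays n
    unfold pvalR
    cases h : popR arr x (sFR arr n (n - i - 1)) with
    | nil =>
      show ((n : Nat) : Int) = (scanR arr x n n i : Int) + 1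
      omega
    | cons t s =>
      exfalso
      have ht : t ∈ popR arr x (sFR arr n (n - i - 1)) := by rw [h]; exact List.mem_cons_self
      have htx := (mem_popR arr _ _ hpwv t).mp ht
      have hti := (hmem t).mp htx.1
      have : arr.getD t 0 ≤ x := scanR_le_x arr x n n i t (by omega) (by omega)
      omega
  · -- first strictly greater element to the right is at scanR + 1
    set r0 := scanR arr x n n i with hr
    have htstack : r0 + 1 ∈ sFR arr n (n - i - 1) := by
      refine (hmem (r0 + 1)).mpr ⟨by omega, hlt, ?_⟩
      intro k hk1 hk2
      have : arr.getD k 0 ≤ x := scanR_le_x arr x n n i k (by omega) (by omega)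
      omega
    have htpop : r0 + 1 ∈ popR arr x (sFR arr n (n - i - 1)) :=
      (mem_popR arr _ _ hpwv (r0 + 1)).mpr ⟨htstack, hgt⟩
    unfold pvalR
    cases h : popR arr x (sFR arr n (n - i - 1)) with
    | nil => rw [h] at htpop; simp at htpop
    | cons t s =>
      rw [h] at htpop
      have ht : t ∈ popR arr x (sFR arr n (n - i - 1)) := by rw [h]; exact List.mem_cons_self
      have htx := (mem_popR arr _ _ hpwv t).mp ht
      have hti := (hmem t).mp htx.1
      have h1 : r0 + 1 ≤ t := by
        by_contra hc
        have : arr.getD t 0 ≤ x := scanR_le_x arr x n n i t (by omega) (by omega)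
        omega
      have h2 : t ≤ r0 + 1 := by
        rcases List.mem_cons.mp htpop with heq | hms
        · omega
        · have hpw' := popR_pairwise arr x _ hpw
          rw [h] at hpw'
          have := (List.pairwise_cons.mp hpw').1 _ hms
          omega
      have ht2 : t = r0 + 1 := by omega
      subst ht2
      show ((r0 + 1 : Nat) : Int) = ((r0 : Nat) : Int) + 1
      push_cast
      ring

-- ===== VERDICT (by name: the statement is the Claim_ definition above) =====
theorem movie_highlights_spec : Claim_equal_movie_highlights := by
  intro arr _
  unfold Spec_movie_highlights
  simp only [movie_highlights, movie_highlights_alt, foldL_eq arr arr.length arr.length,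
    foldR_eq arr arr.length]
  congr 1
  apply PySem.List.foldl_congr_mem
  intro d i hi
  have hin : i < arr.length := List.mem_range.mp hi
  rw [pFL_getD arr arr.length arr.length le_rfl i hin, if_pos hin,
    pFR_getD arr arr.length arr.length le_rfl i hin, if_pos (by omega),
    pvalL_eq_scanL arr i, pvalR_eq_scanR arr arr.length i hin rfl]
  have hL : (i : Int) - ((scanL arr (arr.getD i 0) i : Int) - 1) =
      (i : Int) - (scanL arr (arr.getD i 0) i : Int) + 1 := by ring
  have hR : ((scanR arr (arr.getD i 0) arr.length arr.length i : Int) + 1) - (i : Int) =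
      (scanR arr (arr.getD i 0) arr.length arr.length i : Int) - (i : Int) + 1 := by ring
  rw [hL, hR]
  cases h : d.get? (arr.getD i 0) with
  | none =>
    rw [PySem.Dict.getD_eq_get?_getD, h]
    simp
  | some v =>
    rw [PySem.Dict.getD_eq_get?_getD, h]
    rfl
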